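-- pv_equiv track=rewrite | github.com/mricardo/AoC_2024 | Day9/Day9_PartA.py | rearrange_disk_layout
-- ===== SOURCE A (Python) =====
-- def find_free_space(disk_layout):
--     try:
--         return disk_layout.index('.')
--     except ValueError:
--         return -1
--
-- def rearrange_disk_layout(disk_layout):
--     for i in range(len(disk_layout) - 1, -1, -1):
--
--         block = disk_layout[i]
--         if block != '.':
--             free_space = find_free_space(disk_layout)
--             if free_space != -1 and free_space < i:
--                 disk_layout[free_space] = block
--                 disk_layout[i] = '.'
--
--     return disk_layout
-- ===== SOURCE B (Python) =====
-- def _advance(a, l, r):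
--     while l < r and a[l] != '.':
--         l += 1
--     return l
--
-- def rearrange_disk_layout(disk_layout):
--     a = disk_layout
--     r = len(a) - 1
--     l = _advance(a, 0, len(a))
--     while l < r:
--         if a[r] != '.':
--             a[l] = a[r]
--             a[r] = '.'
--             l = _advance(a, l + 1, r)
--         r -= 1
--     return a
-- ===== Notes on version B (the rewrite author's own statement) =====
-- stated objective: faster
-- what changed: Replaced A's backward scan that calls list.index('.') (a full left-to-right rescan) on every non-free block with a single two-pointer sweep: a left pointer that only ever advances over free slots and a right pointer that only ever retreats over blocks, so each cell is visited O(1) times.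
import Mathlib
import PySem

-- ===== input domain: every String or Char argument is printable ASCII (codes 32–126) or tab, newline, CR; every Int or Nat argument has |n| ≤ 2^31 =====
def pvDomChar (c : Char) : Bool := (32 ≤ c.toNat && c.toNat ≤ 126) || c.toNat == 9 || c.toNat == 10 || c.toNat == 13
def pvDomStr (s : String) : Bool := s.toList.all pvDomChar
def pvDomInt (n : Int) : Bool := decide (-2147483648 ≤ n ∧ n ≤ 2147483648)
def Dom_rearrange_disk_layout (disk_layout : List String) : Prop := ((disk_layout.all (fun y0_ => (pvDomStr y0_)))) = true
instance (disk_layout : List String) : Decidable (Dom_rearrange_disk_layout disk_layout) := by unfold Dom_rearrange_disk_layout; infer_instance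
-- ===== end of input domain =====

-- B replaces A's quadratic "rescan for the leftmost '.' at every step" with a one-sweep
-- two-pointer compaction (objective: faster, asymptotic). Both Pythons mutate the list
-- argument in place in the same way (identical final contents); the theorems are about
-- the returned value.

-- ===== PORT A =====
-- try: return disk_layout.index('.') except ValueError: return -1
def find_free_space (disk_layout : List String) : Int :=
  match PySem.List.index? disk_layout "." with
  | some j => (j : Int)
  | none => -1

-- the for-loop over range(len-1, -1, -1); argument k = i + 1 (k = 0 means the loop is done).
-- free.toNat is exact here: in the taken branch free ≠ -1, and find_free_space only
-- returns -1 or a nonnegative index.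
def loopA : Nat → List String → List String
  | 0, xs => xs
  | k + 1, xs =>
    let i := k
    let block := xs.getD i ""
    if block ≠ "." then
      let free := find_free_space xs
      if free ≠ -1 ∧ free < (i : Int) then
        loopA k ((xs.set free.toNat block).set i ".")
      else loopA k xs
    else loopA k xs

def rearrange_disk_layout (disk_layout : List String) : List String :=
  loopA disk_layout.length disk_layout

-- ===== PORT B =====
-- while l < r and a[l] != '.': l += 1; return l
def advanceB (a : List String) (l r : Nat) : Nat :=
  if l < r then
    if a.getD l "" ≠ "." then advanceB a (l + 1) r else l
  else l
termination_by r - l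

-- the main while-loop of B (r is the right index, decremented every iteration)
def loopB (a : List String) (l r : Nat) : List String :=
  if l < r then
    if a.getD r "" ≠ "." then
      let a' := (a.set l (a.getD r "")).set r "."
      loopB a' (advanceB a' (l + 1) r) (r - 1)
    else loopB a l (r - 1)
  else a
termination_by r

def rearrange_disk_layout_alt (disk_layout : List String) : List String :=
  loopB disk_layout (advanceB disk_layout 0 disk_layout.length) (disk_layout.length - 1)

-- ===== PRECONDITION & SPEC =====
def Spec_rearrange_disk_layout (disk_layout : List String) (out : List String) : Prop := out = rearrange_disk_layout_alt disk_layout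
instance (disk_layout : List String) (out : List String) : Decidable (Spec_rearrange_disk_layout disk_layout out) := by unfold Spec_rearrange_disk_layout; infer_instance

-- ===== CLAIM (what is proved, stated in full; the proofs are below) =====
def Claim_equal_rearrange_disk_layout : Prop := ∀ (disk_layout : List String), Dom_rearrange_disk_layout disk_layout → Spec_rearrange_disk_layout disk_layout (rearrange_disk_layout disk_layout)

-- ===== LEMMAS AND PROOFS =====

theorem getD_set_ne (xs : List String) (i j : Nat) (v : String) (h : i ≠ j) :
    (xs.set i v).getD j "" = xs.getD j "" := by
  simp [List.getD_eq_getElem?_getD, h]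


-- find_free_space returns l when everything below l is a non-dot and l holds a dot
theorem ffs_eq (xs : List String) (l : Nat)
    (h1 : ∀ j, j < l → xs.getD j "" ≠ ".")
    (h2 : xs.getD l "" = ".") :
    find_free_space xs = (l : Int) := by
  induction xs generalizing l with
  | nil => simp [List.getD] at h2
  | cons x t ih =>
    cases l with
    | zero =>
      have hx : x = "." := by simpa [List.getD_eq_getElem?_getD] using h2
      subst hx
      unfold find_free_space
      rw [PySem.List.index?_cons_self]
    | succ m =>
      have hx : x ≠ "." := by
        have := h1 0 (by omega)
        simpa [List.getD_eq_getElem?_getD] using this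
      have h1' : ∀ j, j < m → t.getD j "" ≠ "." := by
        intro j hj
        have := h1 (j + 1) (by omega)
        simpa [List.getD_eq_getElem?_getD] using this
      have h2' : t.getD m "" = "." := by
        simpa [List.getD_eq_getElem?_getD] using h2
      have ht := ih m h1' h2'
      unfold find_free_space at ht ⊢
      rw [PySem.List.index?_cons_of_ne t hx]
      cases hidx : PySem.List.index? t "." with
      | none => rw [hidx] at ht; simp at ht
      | some j =>
        rw [hidx] at ht
        simp only [Option.map_some] at ht ⊢
        omega

-- if find_free_space finds an index below i, there is a dot below i
theorem ffs_dot {xs : List String} {i : Nat}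
    (h1 : find_free_space xs ≠ -1) (h2 : find_free_space xs < (i : Int)) :
    ∃ m, m < i ∧ xs.getD m "" = "." := by
  unfold find_free_space at h1 h2
  cases hidx : PySem.List.index? xs "." with
  | none => rw [hidx] at h1; simp at h1
  | some j =>
    rw [hidx] at h2
    simp only [] at h2
    obtain ⟨hk, hdot, -⟩ := PySem.List.getElem_of_index?_eq_some hidx
    refine ⟨j, by omega, ?_⟩
    rw [List.getD_eq_getElem?_getD, List.getElem?_eq_getElem hk, hdot]
    rfl

-- A's loop is the identity once no dot lies strictly below the next index
theorem loopA_id : ∀ (k : Nat) (xs : List String),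
    (∀ j, j + 1 < k → xs.getD j "" ≠ ".") → loopA k xs = xs := by
  intro k
  induction k with
  | zero => intro xs _; rfl
  | succ k ih =>
    intro xs h
    have h' : ∀ j, j + 1 < k → xs.getD j "" ≠ "." := fun j hj => h j (by omega)
    simp only [loopA]
    split_ifs with hb hc
    · obtain ⟨m, hm, hdot⟩ := ffs_dot hc.1 hc.2
      exact absurd hdot (h m (by omega))
    · exact ih xs h'
    · exact ih xs h'

-- value of getD after a set at the same index
theorem getD_set_self (xs : List String) (i : Nat) (v : String) (h : i < xs.length) :
    (xs.set i v).getD i "" = v := by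
  simp [List.getD_eq_getElem?_getD, h]

-- specification of advanceB
theorem advanceB_spec (r l : Nat) (a : List String) (h : l ≤ r) :
    l ≤ advanceB a l r ∧ advanceB a l r ≤ r ∧
    (∀ j, l ≤ j → j < advanceB a l r → a.getD j "" ≠ ".") ∧
    (advanceB a l r < r → a.getD (advanceB a l r) "" = ".") := by
  rw [advanceB]
  split_ifs with h1 hd
  · obtain ⟨i0, i1, i2, i3⟩ := advanceB_spec r (l + 1) a (by omega)
    refine ⟨by omega, i1, ?_, i3⟩
    intro j hj1 hj2
    rcases Nat.eq_or_lt_of_le hj1 with rfl | hlt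
    · exact hd
    · exact i2 j (by omega) hj2
  · exact ⟨Nat.le_refl l, by omega, fun j hj1 hj2 => absurd hj1 (by omega),
      fun _ => by simpa using hd⟩
  · exact ⟨Nat.le_refl l, h, fun j hj1 hj2 => absurd hj1 (by omega),
      fun hlr => absurd hlr h1⟩
termination_by r - l

-- the coupled-loop invariant: A's countdown from index r equals B's two-pointer sweep
theorem main_lemma (r : Nat) (xs : List String) (l : Nat)
    (hr : r < xs.length)
    (h2 : ∀ j, j < l → xs.getD j "" ≠ ".")
    (h3 : l < r → xs.getD l "" = ".") :
    loopA (r + 1) xs = loopB xs l r := by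
  rw [loopB]
  by_cases hlr : l < r
  · rw [if_pos hlr]
    have hdotl : xs.getD l "" = "." := h3 hlr
    have hr1 : r - 1 + 1 = r := by omega
    by_cases hbr : xs.getD r "" = "."
    · rw [if_neg (by simpa using hbr)]
      have hA : loopA (r + 1) xs = loopA r xs := by
        simp only [loopA]
        rw [if_neg (by simpa using hbr)]
      have hrec := main_lemma (r - 1) xs l (by omega) h2 (fun h => h3 (by omega))
      rw [hr1] at hrec
      rw [hA, hrec]
    · rw [if_pos (by simpa using hbr)]
      set xs' := (xs.set l (xs.getD r "")).set r "." with hxs'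
      set l' := advanceB xs' (l + 1) r with hl'
      have hlen' : xs'.length = xs.length := by simp [hxs']
      obtain ⟨i0, i1, i2, i3⟩ := advanceB_spec r (l + 1) xs' (by omega)
      have h2' : ∀ j, j < l' → xs'.getD j "" ≠ "." := by
        intro j hj
        rcases Nat.lt_trichotomy j l with hjl | rfl | hjl
        · rw [hxs', getD_set_ne _ _ _ _ (by omega), getD_set_ne _ _ _ _ (by omega)]
          exact h2 j hjl
        · rw [hxs', getD_set_ne _ _ _ _ (by omega), getD_set_self _ _ _ (by omega)]
          exact hbr
        · exact i2 j (by omega) hj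
      have h3' : l' < r - 1 → xs'.getD l' "" = "." := fun h => i3 (by omega)
      have hrec := main_lemma (r - 1) xs' l' (by omega) h2' h3'
      rw [hr1] at hrec
      have hffs : find_free_space xs = (l : Int) := ffs_eq xs l h2 hdotl
      have hA : loopA (r + 1) xs = loopA r xs' := by
        simp only [loopA]
        rw [if_pos (by simpa using hbr), hffs]
        rw [if_pos ⟨by omega, by exact_mod_cast hlr⟩]
        simp [hxs']
      rw [hA, hrec]
  · rw [if_neg hlr]
    exact loopA_id (r + 1) xs (fun j hj => h2 j (by omega))
termination_by r

-- ===== VERDICT (by name: the statement is the Claim_ definition above) =====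
theorem rearrange_disk_layout_spec : Claim_equal_rearrange_disk_layout := by
  intro xs _
  unfold Spec_rearrange_disk_layout rearrange_disk_layout rearrange_disk_layout_alt
  by_cases hn : xs.length = 0
  · have hnil : xs = [] := List.eq_nil_of_length_eq_zero hn
    subst hnil
    simp [loopA, loopB, advanceB]
  · obtain ⟨h0, h1, h2, h3⟩ := advanceB_spec xs.length 0 xs (by omega)
    have hlen : xs.length - 1 + 1 = xs.length := by omega
    have := main_lemma (xs.length - 1) xs (advanceB xs 0 xs.length) (by omega)
      (fun j hj => h2 j (by omega) hj)
      (fun hlt => h3 (by omega))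
    rw [hlen] at this
    exact this
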